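-- pv_equiv track=rewrite | github.com/Cyberpaisa/DOF-MESH | core/opsec_shield.py | _is_typosquat
-- ===== SOURCE A (Python) =====
-- def _is_typosquat(name: str, popular: str) -> bool:
--     """Check if a package name looks like a typosquat of a popular package.
--
--     Uses simple edit distance (Levenshtein distance <= 1) and transposition detection.
--     """
--     if name == popular:
--         return False
--     if len(name) < 3 or len(popular) < 3:
--         return False
--
--     # Same length: check substitution (1 char differs) or transposition (adjacent swap)
--     if len(name) == len(popular):
--         diffs = sum(1 for a, b in zip(name, popular) if a != b)
--         if diffs == 1:
--             return True
--         # Check adjacent transposition (Damerau)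
--         if diffs == 2:
--             for i in range(len(name) - 1):
--                 if (name[i] == popular[i + 1] and name[i + 1] == popular[i]
--                         and name[:i] == popular[:i]
--                         and name[i + 2:] == popular[i + 2:]):
--                     return True
--         return False
--
--     # Check edit distance = 1 (insertion/deletion)
--     if abs(len(name) - len(popular)) != 1:
--         return False
--
--     longer, shorter = (name, popular) if len(name) > len(popular) else (popular, name)
--     j = 0
--     skips = 0
--     for i in range(len(longer)):
--         if j < len(shorter) and longer[i] == shorter[j]:
--             j += 1
--         else:
--             skips += 1
--     return skips <= 1
-- ===== SOURCE B (Python) =====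
-- def _one_edit(a: str, b: str) -> bool:
--     # walk past the common prefix, then one suffix comparison decides each edit kind
--     i = 0
--     while i < len(a) and i < len(b) and a[i] == b[i]:
--         i += 1
--     ra, rb = a[i:], b[i:]
--     if len(a) == len(b):
--         if ra[1:] == rb[1:]:
--             return True  # single substitution (or a == b, excluded by caller)
--         return (len(ra) >= 2 and ra[0] == rb[1] and ra[1] == rb[0]
--                 and ra[2:] == rb[2:])  # adjacent transposition
--     if len(a) == len(b) + 1:
--         return ra[1:] == rb  # one deletion
--     if len(b) == len(a) + 1:
--         return ra == rb[1:]  # one insertion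
--     return False
--
--
-- def _is_typosquat(name: str, popular: str) -> bool:
--     if name == popular or len(name) < 3 or len(popular) < 3:
--         return False
--     return _one_edit(name, popular)
-- ===== Notes on version B (the rewrite author's own statement) =====
-- stated objective: simpler
-- what changed: B walks past the common prefix of the two names once and then decides the single edit (substitution, adjacent transposition, insertion or deletion) with one suffix comparison each, replacing A's per-case mismatch counting, slice-scanning transposition loop and greedy skip loop.
import Mathlib
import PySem

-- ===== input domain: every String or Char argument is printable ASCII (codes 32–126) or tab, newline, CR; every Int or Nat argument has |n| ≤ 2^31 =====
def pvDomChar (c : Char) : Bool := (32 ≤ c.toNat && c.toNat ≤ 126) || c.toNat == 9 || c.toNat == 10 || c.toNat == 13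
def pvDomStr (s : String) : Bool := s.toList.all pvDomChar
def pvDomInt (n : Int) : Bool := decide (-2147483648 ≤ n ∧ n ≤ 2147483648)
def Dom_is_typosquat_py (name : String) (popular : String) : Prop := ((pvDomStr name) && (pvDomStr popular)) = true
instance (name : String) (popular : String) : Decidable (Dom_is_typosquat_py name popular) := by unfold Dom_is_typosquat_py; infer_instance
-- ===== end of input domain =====

-- B strips the common prefix of the two names once and decides the single edit with one
-- suffix comparison per edit kind, instead of A's mismatch counting, slice-scanning
-- transposition loop and greedy skip loop (objective: simpler).

-- ===== PORT A =====
-- loop condition of A's transposition scan (helper of port A)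
abbrev pvTransCond (a b : List Char) (i : Int) : Prop :=
  PySem.List.pyGetD a i ' ' = PySem.List.pyGetD b (i + 1) ' ' ∧
  PySem.List.pyGetD a (i + 1) ' ' = PySem.List.pyGetD b i ' ' ∧
  PySem.List.slice a none (some i) = PySem.List.slice b none (some i) ∧
  PySem.List.slice a (some (i + 2)) none = PySem.List.slice b (some (i + 2)) none

def pvDiffsFold (a b : List Char) : Int :=
  (a.zip b).foldl (fun acc p => if p.1 ≠ p.2 then acc + 1 else acc) 0

def pvTransLoop (a b : List Char) : Bool :=
  (PySem.List.pyRange 0 ((a.length : Int) - 1) 1).any (fun i => decide (pvTransCond a b i))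

def pvStep (shorter : List Char) (s : Int × Int) (c : Char) : Int × Int :=
  if s.1 < (shorter.length : Int) ∧ c = PySem.List.pyGetD shorter s.1 ' ' then (s.1 + 1, s.2)
  else (s.1, s.2 + 1)

def pvGreedy (longer shorter : List Char) : Int × Int :=
  (PySem.List.pyRange 0 (longer.length : Int) 1).foldl
    (fun s i => pvStep shorter s (PySem.List.pyGetD longer i ' ')) (0, 0)

def is_typosquat_py (name : String) (popular : String) : Bool :=
  let nl := name.toList
  let pl := popular.toList
  if nl = pl then false
  else if nl.length < 3 ∨ pl.length < 3 then false
  else if nl.length = pl.length then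
    let diffs := pvDiffsFold nl pl
    if diffs = 1 then true
    else if diffs = 2 then pvTransLoop nl pl
    else false
  else if ((nl.length : Int) - (pl.length : Int)).natAbs ≠ 1 then false
  else
    let ls := if nl.length > pl.length then (nl, pl) else (pl, nl)
    decide ((pvGreedy ls.1 ls.2).2 ≤ 1)

-- ===== PORT B =====
def pvAfterMismatch (a b : List Char) : Bool :=
  if a.length = b.length then
    if a.drop 1 = b.drop 1 then true
    else decide (2 ≤ a.length ∧ a.getD 0 ' ' = b.getD 1 ' ' ∧ a.getD 1 ' ' = b.getD 0 ' ' ∧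
           a.drop 2 = b.drop 2)
  else if a.length = b.length + 1 then decide (a.drop 1 = b)
  else if b.length = a.length + 1 then decide (a = b.drop 1)
  else false

def pvOneEdit : List Char → List Char → Bool
  | x :: xs, y :: ys => if x = y then pvOneEdit xs ys else pvAfterMismatch (x :: xs) (y :: ys)
  | a, b => pvAfterMismatch a b

def is_typosquat_py_alt (name : String) (popular : String) : Bool :=
  if name.toList = popular.toList ∨ name.toList.length < 3 ∨ popular.toList.length < 3 then false
  else pvOneEdit name.toList popular.toList

-- ===== PRECONDITION & SPEC =====
def Spec_is_typosquat_py (name : String) (popular : String) (out : Bool) : Prop := out = is_typosquat_py_alt name popular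
instance (name : String) (popular : String) (out : Bool) : Decidable (Spec_is_typosquat_py name popular out) := by unfold Spec_is_typosquat_py; infer_instance

-- ===== CLAIM (what is proved, stated in full; the proofs are below) =====
def Claim_equal_is_typosquat_py : Prop := ∀ (name : String) (popular : String), Dom_is_typosquat_py name popular → Spec_is_typosquat_py name popular (is_typosquat_py name popular)

-- ===== LEMMAS AND PROOFS =====
-- ===== helpers =====
def pvCntD (a b : List Char) : Nat := (a.zip b).countP (fun p => decide (p.1 ≠ p.2))

abbrev pvQ (a b : List Char) (k : Nat) : Prop :=
  a.getD k ' ' = b.getD (k + 1) ' ' ∧ a.getD (k + 1) ' ' = b.getD k ' ' ∧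
  a.take k = b.take k ∧ a.drop (k + 2) = b.drop (k + 2)

def pvTransAux : List Char → List Char → Bool
  | x1 :: x2 :: xs, y1 :: y2 :: ys =>
      decide (x1 = y2 ∧ x2 = y1 ∧ xs = ys) || (decide (x1 = y1) && pvTransAux (x2 :: xs) (y2 :: ys))
  | _, _ => false

def pvSkips : List Char → List Char → Nat
  | [], _ => 0
  | _ :: l, [] => 1 + pvSkips l []
  | c :: l, d :: s => if c = d then pvSkips l s else 1 + pvSkips l (d :: s)

lemma pvDiffsFold_eq (a b : List Char) : pvDiffsFold a b = ((pvCntD a b : Nat) : Int) := by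
  have h := PySem.List.foldl_count_if (fun p : Char × Char => decide (p.1 ≠ p.2)) (a.zip b) 0
  simpa [pvDiffsFold, pvCntD, decide_eq_true_eq] using h

lemma pvCntD_zero_iff (a b : List Char) (h : a.length = b.length) : pvCntD a b = 0 ↔ a = b := by
  induction a generalizing b with
  | nil => cases b with
    | nil => simp [pvCntD]
    | cons y ys => simp at h
  | cons x xs ih => cases b with
    | nil => simp at h
    | cons y ys =>
      simp only [List.length_cons, Nat.add_right_cancel_iff] at h
      simp only [pvCntD, List.zip_cons_cons, List.countP_cons] at *
      by_cases hxy : x = y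
      · subst hxy
        rw [if_neg (by simp), Nat.add_zero, ih ys h, List.cons_eq_cons]
        simp
      · rw [if_pos (by simp [hxy])]
        simp [hxy]

lemma pvSkips_zero_iff (l s : List Char) (h : l.length = s.length) : pvSkips l s = 0 ↔ l = s := by
  induction l generalizing s with
  | nil => cases s with
    | nil => simp [pvSkips]
    | cons d s' => simp at h
  | cons c l' ih => cases s with
    | nil => simp at h
    | cons d s' =>
      simp only [List.length_cons, Nat.add_right_cancel_iff] at h
      by_cases hcd : c = d
      · subst hcd
        rw [pvSkips, if_pos rfl, ih s' h, List.cons_eq_cons]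
        simp
      · rw [pvSkips, if_neg hcd]
        simp [hcd]

-- cast bridge: A's loop condition at a Nat index is pvQ
lemma pvTransCond_cast (a b : List Char) (k : Nat) : pvTransCond a b (k : Int) ↔ pvQ a b k := by
  have e1 : (k : Int) + 1 = ((k + 1 : Nat) : Int) := by push_cast; ring
  have e2 : (k : Int) + 2 = ((k + 2 : Nat) : Int) := by push_cast; ring
  rw [pvTransCond, e1, e2, PySem.List.pyGetD_natCast, PySem.List.pyGetD_natCast,
    PySem.List.pyGetD_natCast, PySem.List.pyGetD_natCast,
    PySem.List.slice_to _ (by positivity), PySem.List.slice_to _ (by positivity),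
    PySem.List.slice_from _ (by positivity), PySem.List.slice_from _ (by positivity)]
  simp [pvQ, show ((k : Int) + 2).toNat = k + 2 by omega]

lemma pvTransLoop_eq_range (a b : List Char) :
    pvTransLoop a b = (List.range (a.length - 1)).any (fun k => decide (pvQ a b k)) := by
  rw [pvTransLoop, PySem.List.pyRange_one, List.any_map]
  rw [show ((a.length : Int) - 1 - 0).toNat = a.length - 1 by omega]
  apply PySem.List.any_congr_mem
  intro k _
  simp only [Function.comp_apply]
  rw [show (0 : Int) + (k : Int) = ((k : Nat) : Int) by ring]
  exact decide_eq_decide.mpr (pvTransCond_cast a b k)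

lemma pvQ_shift (x y : Char) (xs ys : List Char) (k : Nat) :
    pvQ (x :: xs) (y :: ys) (k + 1) ↔ (x = y ∧ pvQ xs ys k) := by
  simp only [pvQ, List.getD_cons_succ, List.take_succ_cons, List.drop_succ_cons,
    List.cons_eq_cons]
  tauto

lemma pv_any_const_and (l : List Nat) (c : Bool) (f : Nat → Bool) :
    (l.any fun k => c && f k) = (c && l.any f) := by
  cases c <;> simp

lemma pvTransLoop_eq (a b : List Char) (h : a.length = b.length) :
    pvTransLoop a b = pvTransAux a b := by
  induction a generalizing b with
  | nil =>
    cases b with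
    | nil => simp [pvTransLoop_eq_range, pvTransAux]
    | cons y ys => simp at h
  | cons x1 xs ih =>
    cases b with
    | nil => simp at h
    | cons y1 ys =>
      simp only [List.length_cons, Nat.add_right_cancel_iff] at h
      cases xs with
      | nil =>
        cases ys with
        | nil => simp [pvTransLoop_eq_range, pvTransAux]
        | cons y2 ys' => simp at h
      | cons x2 xs' =>
        cases ys with
        | nil => simp at h
        | cons y2 ys' =>
          rw [pvTransLoop_eq_range]
          have hlen : (x1 :: x2 :: xs').length - 1 = xs'.length + 1 := by simp
          rw [hlen, List.range_succ_eq_map, List.any_cons, List.any_map]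
          have h0 : (decide (pvQ (x1 :: x2 :: xs') (y1 :: y2 :: ys') 0)) =
              decide (x1 = y2 ∧ x2 = y1 ∧ xs' = ys') := by
            apply decide_eq_decide.mpr
            simp [pvQ]
          have hsh : ∀ k : Nat,
              ((fun k => decide (pvQ (x1 :: x2 :: xs') (y1 :: y2 :: ys') k)) ∘ Nat.succ) k =
              (decide (x1 = y1) && decide (pvQ (x2 :: xs') (y2 :: ys') k)) := by
            intro k
            simp only [Function.comp_apply, Nat.succ_eq_add_one, ← Bool.decide_and]
            exact decide_eq_decide.mpr (pvQ_shift x1 y1 (x2 :: xs') (y2 :: ys') k)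
          rw [PySem.List.any_congr_mem (fun k _ => hsh k), pv_any_const_and]
          have htail : (List.range xs'.length).any (fun k => decide (pvQ (x2 :: xs') (y2 :: ys') k)) =
              pvTransAux (x2 :: xs') (y2 :: ys') := by
            rw [← ih (y2 :: ys') (by simpa using h)]
            rw [pvTransLoop_eq_range]
            simp
          rw [h0, htail, pvTransAux]

lemma pvEqualCase (a b : List Char) (h : a.length = b.length) (hne : a ≠ b) :
    (if pvCntD a b = 1 then true else if pvCntD a b = 2 then pvTransAux a b else false) =
      pvOneEdit a b := by
  induction a generalizing b with
  | nil =>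
    cases b with
    | nil => exact absurd rfl hne
    | cons y ys => simp at h
  | cons x xs ih =>
    cases b with
    | nil => simp at h
    | cons y ys =>
      simp only [List.length_cons, Nat.add_right_cancel_iff] at h
      by_cases hxy : x = y
      · subst hxy
        have hne' : xs ≠ ys := fun hc => hne (by rw [hc])
        have hcnt : pvCntD (x :: xs) (x :: ys) = pvCntD xs ys := by
          simp [pvCntD]
        have htr : pvTransAux (x :: xs) (x :: ys) = pvTransAux xs ys := by
          cases xs with
          | nil => cases ys with
            | nil => exact absurd rfl hne'
            | cons y2 ys' => simp at h
          | cons x2 xs' =>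
            cases ys with
            | nil => simp at h
            | cons y2 ys' =>
              rw [pvTransAux]
              have hsw : ¬(x = y2 ∧ x2 = x ∧ xs' = ys') := by
                rintro ⟨h1, h2, h3⟩
                exact hne' (by rw [← h1, h2, h3])
              simp [hsw]
          -- remaining: pvTransAux (x :: []) (x :: []) handled above
        rw [hcnt, htr, pvOneEdit, if_pos rfl]
        exact ih ys h hne'
      · -- mismatch at the head
        have hcons : pvCntD (x :: xs) (y :: ys) = pvCntD xs ys + 1 := by
          simp [pvCntD, hxy]
        by_cases hxsys : xs = ys
        · subst hxsys
          have h1 : pvCntD (x :: xs) (y :: xs) = 1 := by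
            rw [hcons, (pvCntD_zero_iff xs xs rfl).mpr rfl]
          simp [h1, pvOneEdit, hxy, pvAfterMismatch]
        · have hc0 : pvCntD xs ys ≠ 0 := fun hc => hxsys ((pvCntD_zero_iff xs ys h).mp hc)
          have hne1 : pvCntD (x :: xs) (y :: ys) ≠ 1 := by omega
          rw [if_neg hne1]
          cases xs with
          | nil =>
            cases ys with
            | nil => exact absurd rfl hxsys
            | cons y2 ys' => simp at h
          | cons x2 xs' =>
            cases ys with
            | nil => simp at h
            | cons y2 ys' =>
              simp only [List.length_cons, Nat.add_right_cancel_iff] at h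
              have hR : pvOneEdit (x :: x2 :: xs') (y :: y2 :: ys') =
                  decide (x = y2 ∧ x2 = y ∧ xs' = ys') := by
                rw [pvOneEdit, if_neg hxy, pvAfterMismatch,
                  if_pos (show (x :: x2 :: xs').length = (y :: y2 :: ys').length by simp [h])]
                simp only [List.drop_succ_cons, List.drop_zero]
                rw [if_neg hxsys]
                apply decide_eq_decide.mpr
                constructor
                · rintro ⟨-, h1, h2, h3⟩
                  exact ⟨h1, h2, h3⟩
                · rintro ⟨h1, h2, h3⟩
                  exact ⟨by simp, h1, h2, h3⟩
              rw [hR]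
              have htr : pvTransAux (x :: x2 :: xs') (y :: y2 :: ys') =
                  decide (x = y2 ∧ x2 = y ∧ xs' = ys') := by
                rw [pvTransAux]
                simp [hxy]
              by_cases hsw : x = y2 ∧ x2 = y ∧ xs' = ys'
              · obtain ⟨h1, h2, h3⟩ := hsw
                have hx2y2 : x2 ≠ y2 := fun hc => hxy (h1.trans (hc.symm.trans h2))
                have hcnt2 : pvCntD (x :: x2 :: xs') (y :: y2 :: ys') = 2 := by
                  have h0 : pvCntD xs' ys' = 0 :=
                    (pvCntD_zero_iff xs' ys' (by simpa using h)).mpr h3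
                  have hone : pvCntD (x2 :: xs') (y2 :: ys') = 1 := by
                    simp [pvCntD, hx2y2]
                    simpa [pvCntD] using h0
                  rw [hcons, hone]
                rw [if_pos hcnt2, htr]
              · rw [htr]
                have hd : decide (x = y2 ∧ x2 = y ∧ xs' = ys') = false := by
                  simpa using hsw
                rw [hd]
                exact ite_self false

lemma pvGreedy_fold (S : List Char) : ∀ (l : List Char) (j k : Nat),
    (l.foldl (pvStep S) ((j : Int), (k : Int))).2 = ((k + pvSkips l (S.drop j) : Nat) : Int) := by
  intro l
  induction l with
  | nil => intro j k; simp [pvSkips]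
  | cons c l' ih =>
    intro j k
    rw [List.foldl_cons]
    by_cases hj : j < S.length
    · have hget : PySem.List.pyGetD S ((j : Nat) : Int) ' ' = S[j] := by
        rw [PySem.List.pyGetD_natCast, List.getD_eq_getElem?_getD, List.getElem?_eq_getElem hj]
        rfl
      have hdrop : S.drop j = S[j] :: S.drop (j + 1) := List.drop_eq_getElem_cons hj
      by_cases hc : c = S[j]
      · have : pvStep S ((j : Int), (k : Int)) c = (((j + 1 : Nat) : Int), ((k : Nat) : Int)) := by
          rw [pvStep, if_pos ⟨show (j : Int) < (S.length : Int) by exact_mod_cast hj, by rw [hget]; exact hc⟩]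
          simp
        rw [this, ih (j + 1) k, hdrop, pvSkips, if_pos hc]
      · have : pvStep S ((j : Int), (k : Int)) c = (((j : Nat) : Int), ((k + 1 : Nat) : Int)) := by
          rw [pvStep, if_neg]
          · simp
          · rintro ⟨-, hcc⟩
            exact hc (by rwa [hget] at hcc)
        rw [this, ih j (k + 1), hdrop, pvSkips, if_neg hc]
        push_cast
        ring
    · have hdrop : S.drop j = [] := List.drop_eq_nil_of_le (by omega)
      have : pvStep S ((j : Int), (k : Int)) c = (((j : Nat) : Int), ((k + 1 : Nat) : Int)) := by
        rw [pvStep, if_neg]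
        · simp
        · rintro ⟨hlt, -⟩
          have hlt' : (j : Int) < (S.length : Int) := hlt
          exact hj (by exact_mod_cast hlt')
      rw [this, ih j (k + 1), hdrop, pvSkips]
      push_cast
      ring

lemma pvGreedy_eq (L S : List Char) : (pvGreedy L S).2 = ((pvSkips L S : Nat) : Int) := by
  rw [pvGreedy, PySem.List.foldl_pyRange_zero_pyGetD' L ' ' (pvStep S) (0, 0)]
  have := pvGreedy_fold S L 0 0
  simpa using this

lemma pvDelCase (a b : List Char) (h : a.length = b.length + 1) :
    decide (pvSkips a b ≤ 1) = pvOneEdit a b := by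
  induction a generalizing b with
  | nil => simp at h
  | cons c a' ih =>
    cases b with
    | nil =>
      have ha' : a' = [] := by
        simpa using (by simpa using h : a'.length = 0)
      subst ha'
      simp [pvSkips, pvOneEdit, pvAfterMismatch]
    | cons d b' =>
      simp only [List.length_cons, Nat.add_right_cancel_iff] at h
      by_cases hcd : c = d
      · subst hcd
        rw [pvSkips, if_pos rfl, pvOneEdit, if_pos rfl]
        exact ih b' h
      · rw [pvSkips, if_neg hcd, pvOneEdit, if_neg hcd, pvAfterMismatch,
          if_neg (by simp; omega), if_pos (by simp [h]),
          show (c :: a').drop 1 = a' from rfl]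
        have hzero := pvSkips_zero_iff a' (d :: b') (by simpa using h)
        by_cases hz : a' = d :: b'
        · have h0 : pvSkips a' (d :: b') = 0 := hzero.mpr hz
          rw [h0]
          simp [hz]
        · have h0 : pvSkips a' (d :: b') ≠ 0 := fun hc => hz (hzero.mp hc)
          have hgt : ¬(1 + pvSkips a' (d :: b') ≤ 1) := by omega
          simp [hgt, hz]

lemma pvInsCase (a b : List Char) (h : b.length = a.length + 1) :
    decide (pvSkips b a ≤ 1) = pvOneEdit a b := by
  induction a generalizing b with
  | nil =>
    cases b with
    | nil => simp at h
    | cons d b' =>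
      have hb' : b' = [] := by
        simpa using (by simpa using h : b'.length = 0)
      subst hb'
      simp [pvSkips, pvOneEdit, pvAfterMismatch]
  | cons c a' ih =>
    cases b with
    | nil => simp at h
    | cons d b' =>
      simp only [List.length_cons, Nat.add_right_cancel_iff] at h
      by_cases hcd : c = d
      · subst hcd
        rw [pvSkips, if_pos rfl, pvOneEdit, if_pos rfl]
        exact ih b' h
      · rw [pvSkips, if_neg (fun hc => hcd hc.symm), pvOneEdit, if_neg hcd, pvAfterMismatch,
          if_neg (by simp; omega), if_neg (by simp; omega), if_pos (by simp [h]),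
          show (d :: b').drop 1 = b' from rfl]
        have hzero := pvSkips_zero_iff b' (c :: a') (by simpa using h)
        by_cases hz : b' = c :: a'
        · have h0 : pvSkips b' (c :: a') = 0 := hzero.mpr hz
          rw [h0]
          simp [hz]
        · have h0 : pvSkips b' (c :: a') ≠ 0 := fun hc => hz (hzero.mp hc)
          have hgt : ¬(1 + pvSkips b' (c :: a') ≤ 1) := by omega
          have hz' : ¬(c :: a' = b') := fun hc => hz hc.symm
          simp [hgt, hz']

lemma pvFarCase (a b : List Char) (h1 : a.length ≠ b.length) (h2 : a.length ≠ b.length + 1)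
    (h3 : b.length ≠ a.length + 1) : pvOneEdit a b = false := by
  induction a generalizing b with
  | nil =>
    cases b with
    | nil => exact absurd rfl h1
    | cons d b' =>
      rw [show pvOneEdit [] (d :: b') = pvAfterMismatch [] (d :: b') from rfl,
        pvAfterMismatch, if_neg h1, if_neg h2, if_neg h3]
  | cons c a' ih =>
    cases b with
    | nil =>
      rw [show pvOneEdit (c :: a') [] = pvAfterMismatch (c :: a') [] from rfl,
        pvAfterMismatch, if_neg h1, if_neg h2, if_neg h3]
    | cons d b' =>
      by_cases hcd : c = d
      · rw [pvOneEdit, if_pos hcd]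
        exact ih b' (by simpa using h1) (by simp at h2 ⊢; omega) (by simp at h3 ⊢; omega)
      · rw [pvOneEdit, if_neg hcd, pvAfterMismatch, if_neg h1, if_neg h2, if_neg h3]

-- ===== VERDICT (by name: the statement is the Claim_ definition above) =====
theorem is_typosquat_py_spec : Claim_equal_is_typosquat_py := by
  intro name popular _
  unfold Spec_is_typosquat_py
  unfold is_typosquat_py is_typosquat_py_alt
  set a := name.toList with ha
  set b := popular.toList with hb
  by_cases h1 : a = b
  · simp [h1]
  by_cases h2 : a.length < 3 ∨ b.length < 3
  · simp [h1, h2]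
  have hg : ¬(a = b ∨ a.length < 3 ∨ b.length < 3) := by tauto
  rw [if_neg h1, if_neg h2, if_neg hg]
  by_cases hlen : a.length = b.length
  · rw [if_pos hlen]
    simp only [pvDiffsFold_eq, pvTransLoop_eq a b hlen,
      show ((pvCntD a b : Nat) : Int) = 1 ↔ pvCntD a b = 1 by omega,
      show ((pvCntD a b : Nat) : Int) = 2 ↔ pvCntD a b = 2 by omega]
    exact pvEqualCase a b hlen h1
  · rw [if_neg hlen]
    by_cases habs : ((a.length : Int) - (b.length : Int)).natAbs ≠ 1
    · rw [if_pos habs]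
      exact (pvFarCase a b hlen (by omega) (by omega)).symm
    · rw [if_neg habs]
      by_cases hgt : a.length > b.length
      · have hd : a.length = b.length + 1 := by omega
        rw [if_pos hgt]
        simp only [pvGreedy_eq,
          show ((pvSkips a b : Nat) : Int) ≤ 1 ↔ pvSkips a b ≤ 1 by omega]
        exact pvDelCase a b hd
      · have hd : b.length = a.length + 1 := by omega
        rw [if_neg hgt]
        simp only [pvGreedy_eq,
          show ((pvSkips b a : Nat) : Int) ≤ 1 ↔ pvSkips b a ≤ 1 by omega]
        exact pvInsCase a b hd
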